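-- pv_equiv track=rewrite | github.com/TessFerrandez/algorithms | contest/bw-90/lc-m-2453-destroy-sequential-targets.py | destroyTargets1
-- ===== SOURCE A (Python) =====
-- from collections import defaultdict
-- from typing import List
--
-- def destroyTargets1(nums: List[int], space: int) -> int:
--     nums.sort()
--
--     mod_count = defaultdict(int)
--     mod_first = {}
--
--     best_count = 0
--     best_mod = -1
--
--     for num in nums:
--         remainder = num % space
--         mod_count[remainder] += 1
--         if remainder not in mod_first:
--             mod_first[remainder] = num
--
--         if mod_count[remainder] > best_count:
--             best_count = mod_count[remainder]
--             best_mod = remainder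
--         elif mod_count[remainder] == best_count:
--             if mod_first[best_mod] > mod_first[remainder]:
--                 best_mod = remainder
--
--     return mod_first[best_mod]
-- ===== SOURCE B (Python) =====
-- def destroyTargets1(nums, space):
--     # one pass: per-remainder (count, minimum); then pick best (no sort)
--     stats = {}
--     for num in nums:
--         r = num % space
--         if r in stats:
--             c, m = stats[r]
--             stats[r] = (c + 1, m if m < num else num)
--         else:
--             stats[r] = (1, num)
--     best_c, best_m = 0, 0
--     for c, m in stats.values():
--         if c > best_c or (c == best_c and m < best_m):
--             best_c, best_m = c, m
--     return best_m
-- ===== Notes on version B (the rewrite author's own statement) =====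
-- stated objective: faster
-- what changed: A sorts the list and keeps a streaming argmax over exact first occurrences; B makes one unsorted pass building per-remainder (count, minimum) summaries in a dict and then scans those summaries for the maximal count with smallest minimum, removing the sort.
-- outside the precondition, e.g. on destroyTargets1([], 2): A raises KeyError, B returns 0; on destroyTargets1([1, 2], 0): A raises ZeroDivisionError, B raises ZeroDivisionError
import Mathlib
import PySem

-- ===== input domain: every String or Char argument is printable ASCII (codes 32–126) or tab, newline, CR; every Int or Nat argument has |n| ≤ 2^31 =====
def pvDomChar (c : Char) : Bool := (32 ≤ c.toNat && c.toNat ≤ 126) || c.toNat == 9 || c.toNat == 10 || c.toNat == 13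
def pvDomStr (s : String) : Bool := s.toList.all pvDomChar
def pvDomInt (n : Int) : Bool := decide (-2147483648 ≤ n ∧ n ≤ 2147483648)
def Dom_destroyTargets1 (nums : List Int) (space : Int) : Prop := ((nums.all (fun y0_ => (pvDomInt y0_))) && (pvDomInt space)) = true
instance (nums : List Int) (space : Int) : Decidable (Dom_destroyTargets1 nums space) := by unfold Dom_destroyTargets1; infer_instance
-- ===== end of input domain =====

-- B replaces A's sort + streaming argmax by a single counting/min pass plus a scan of the
-- per-remainder summaries (no sort); equivalence is about the RETURN value only — A sorts
-- its argument list in place, B does not mutate it.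


-- ===== PORT A =====
-- state = (mod_count, mod_first, best_count, best_mod)
def destroyTargets1Loop (space : Int)
    (st : PySem.Dict Int Int × PySem.Dict Int Int × Int × Int) (num : Int) :
    PySem.Dict Int Int × PySem.Dict Int Int × Int × Int :=
  let mc := st.1; let mf := st.2.1; let bc := st.2.2.1; let bm := st.2.2.2
  let r := PySem.Int.mod num space
  let mc := mc.modify r 0 (· + 1)
  let mf := if mf.contains r then mf else mf.insert r num
  if mc.getD r 0 > bc then (mc, mf, mc.getD r 0, r)
  else if mc.getD r 0 = bc then
    -- mod_first[best_mod] / mod_first[remainder]: both keys present here (KeyError impossible;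
    -- the getD defaults are never read)
    if mf.getD bm 0 > mf.getD r 0 then (mc, mf, bc, r) else (mc, mf, bc, bm)
  else (mc, mf, bc, bm)

def destroyTargets1 (nums : List Int) (space : Int) : Int :=
  let s := PySem.List.sorted nums (fun x => x) false
  let st := s.foldl (destroyTargets1Loop space) (PySem.Dict.empty, PySem.Dict.empty, 0, -1)
  -- mod_first[best_mod]: KeyError (empty nums) excluded by Pre_
  st.2.1.getD st.2.2.2 0

-- ===== PORT B =====
def destroyTargets1_alt (nums : List Int) (space : Int) : Int :=
  let stats := nums.foldl (fun (d : PySem.Dict Int (Int × Int)) num =>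
      let r := PySem.Int.mod num space
      match d.get? r with
      | some (c, m) => d.insert r (c + 1, if m < num then m else num)
      | none => d.insert r (1, num)) PySem.Dict.empty
  let best := stats.values.foldl (fun (b : Int × Int) cm =>
      if cm.1 > b.1 || (cm.1 == b.1 && cm.2 < b.2) then cm else b) (0, 0)
  best.2

-- ===== PRECONDITION & SPEC =====
-- Pre_ excludes exactly the inputs where Python A raises: nums = [] (KeyError on mod_first[-1])
-- and space = 0 (ZeroDivisionError).
def Pre_destroyTargets1 (nums : List Int) (space : Int) : Prop := nums ≠ [] ∧ space ≠ 0
instance (nums : List Int) (space : Int) : Decidable (Pre_destroyTargets1 nums space) := by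
  unfold Pre_destroyTargets1; infer_instance

def pvWitness_destroyTargets1 : List Int × Int := ([3, 7, 8, 1, 1, 5], 2)

def Spec_destroyTargets1 (nums : List Int) (space : Int) (out : Int) : Prop := out = destroyTargets1_alt nums space
instance (nums : List Int) (space : Int) (out : Int) : Decidable (Spec_destroyTargets1 nums space out) := by unfold Spec_destroyTargets1; infer_instance

-- ===== CLAIM (what is proved, stated in full; the proofs are below) =====
def Claim_equal_destroyTargets1 : Prop := ∀ (nums : List Int) (space : Int), Dom_destroyTargets1 nums space → Pre_destroyTargets1 nums space → Spec_destroyTargets1 nums space (destroyTargets1 nums space)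

-- ===== LEMMAS AND PROOFS =====

-- number of elements of xs in remainder class r
def pvCnt (space : Int) (xs : List Int) (r : Int) : Nat :=
  xs.countP (fun x => PySem.Int.mod x space == r)

-- first element of xs in remainder class r
def pvFirst (space : Int) (xs : List Int) (r : Int) : Option Int :=
  (xs.filter (fun x => PySem.Int.mod x space == r)).head?

-- v is the minimum of its remainder class
def pvClassMin (space : Int) (xs : List Int) (v : Int) : Prop :=
  v ∈ xs ∧ ∀ y ∈ xs, PySem.Int.mod y space = PySem.Int.mod v space → v ≤ y

-- the commonly characterised answer: class minimum, class of maximal count,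
-- smallest such class minimum
def pvBest (space : Int) (xs : List Int) (v : Int) : Prop :=
  pvClassMin space xs v ∧
  (∀ y ∈ xs, pvCnt space xs (PySem.Int.mod y space) ≤ pvCnt space xs (PySem.Int.mod v space)) ∧
  (∀ y, pvClassMin space xs y →
    pvCnt space xs (PySem.Int.mod y space) = pvCnt space xs (PySem.Int.mod v space) → v ≤ y)

theorem pvBest_unique (space : Int) (xs : List Int) (v w : Int)
    (hv : pvBest space xs v) (hw : pvBest space xs w) : v = w := by
  obtain ⟨hv1, hv2, hv3⟩ := hv
  obtain ⟨hw1, hw2, hw3⟩ := hw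
  have h1 := hv2 w hw1.1
  have h2 := hw2 v hv1.1
  have hc : pvCnt space xs (PySem.Int.mod w space) = pvCnt space xs (PySem.Int.mod v space) :=
    le_antisymm h1 h2
  have := hv3 w hw1 hc
  have := hw3 v hv1 hc.symm
  omega

-- ---------- basic facts about remainder classes ----------

theorem pvCnt_append (space x : Int) (p : List Int) (r : Int) :
    pvCnt space (p ++ [x]) r
      = pvCnt space p r + (if PySem.Int.mod x space = r then 1 else 0) := by
  by_cases h : PySem.Int.mod x space = r <;>
    simp [pvCnt, List.countP_append, h]

theorem pvCnt_eq_zero_iff (space : Int) (p : List Int) (r : Int) :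
    pvCnt space p r = 0 ↔ ∀ x ∈ p, PySem.Int.mod x space ≠ r := by
  simp [pvCnt, List.countP_eq_zero]

theorem pvCnt_pos_of_mem (space : Int) (p : List Int) (y : Int) (hy : y ∈ p) :
    0 < pvCnt space p (PySem.Int.mod y space) := by
  rcases Nat.eq_zero_or_pos (pvCnt space p (PySem.Int.mod y space)) with h | h
  · exact absurd rfl ((pvCnt_eq_zero_iff _ _ _).1 h y hy)
  · exact h

theorem pvFirst_append (space x : Int) (p : List Int) (r : Int) :
    pvFirst space (p ++ [x]) r
      = (pvFirst space p r).or (if PySem.Int.mod x space = r then some x else none) := by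
  by_cases h : PySem.Int.mod x space = r <;>
    simp [pvFirst, List.filter_append, List.head?_append, h]

theorem pvFirst_isSome_of_cnt_ne_zero (space : Int) (p : List Int) (r : Int)
    (h : pvCnt space p r ≠ 0) : ∃ m, pvFirst space p r = some m := by
  unfold pvFirst
  rw [pvCnt, List.countP_eq_length_filter] at h
  cases hf : p.filter (fun x => PySem.Int.mod x space == r) with
  | nil => rw [hf] at h; simp at h
  | cons a t => exact ⟨a, by simp⟩

theorem pvFirst_mem_class (space : Int) (p : List Int) (r m : Int)
    (h : pvFirst space p r = some m) : m ∈ p ∧ PySem.Int.mod m space = r := by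
  unfold pvFirst at h
  have hm : m ∈ p.filter (fun x => PySem.Int.mod x space == r) :=
    List.mem_of_mem_head? (by simp [h])
  simpa using hm

-- ---------- B side: the per-remainder (count, min) dictionary ----------

-- minimum of the remainder class (0 when the class is empty — only read on nonempty classes)
def pvCMin (space : Int) (xs : List Int) (r : Int) : Int :=
  ((xs.filter (fun x => PySem.Int.mod x space == r)).min?).getD 0

theorem pvCMin_spec (space : Int) (p : List Int) (r : Int)
    (h : pvCnt space p r ≠ 0) :
    pvCMin space p r ∈ p ∧ PySem.Int.mod (pvCMin space p r) space = r ∧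
      ∀ y ∈ p, PySem.Int.mod y space = r → pvCMin space p r ≤ y := by
  rw [pvCnt, List.countP_eq_length_filter] at h
  cases hf : p.filter (fun x => PySem.Int.mod x space == r) with
  | nil => rw [hf] at h; simp at h
  | cons a t =>
    have hsome : ∃ m, (p.filter (fun x => PySem.Int.mod x space == r)).min? = some m := by
      rw [hf]; cases hq : (a :: t).min? with
      | none => simp at hq
      | some m => exact ⟨m, rfl⟩
    obtain ⟨m, hm⟩ := hsome
    have hspec := (List.min?_eq_some_iff).1 hm
    have hmem : m ∈ p ∧ PySem.Int.mod m space = r := by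
      have := hspec.1; simpa using List.mem_filter.1 this
    refine ⟨by simpa [pvCMin, hm] using hmem.1, by simpa [pvCMin, hm] using hmem.2, ?_⟩
    intro y hy hyr
    have : y ∈ p.filter (fun x => PySem.Int.mod x space == r) := by
      simp [List.mem_filter, hy, hyr]
    simpa [pvCMin, hm] using hspec.2 y this

theorem pvCMin_append_same (space x : Int) (p : List Int)
    (h : pvCnt space p (PySem.Int.mod x space) ≠ 0) :
    pvCMin space (p ++ [x]) (PySem.Int.mod x space)
      = min (pvCMin space p (PySem.Int.mod x space)) x := by
  rw [pvCnt, List.countP_eq_length_filter] at h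
  set r := PySem.Int.mod x space with hr
  cases hf : p.filter (fun y => PySem.Int.mod y space == r) with
  | nil => rw [hf] at h; simp at h
  | cons a t =>
    have hsome : ∃ m, (p.filter (fun y => PySem.Int.mod y space == r)).min? = some m := by
      rw [hf]; cases hq : (a :: t).min? with
      | none => simp at hq
      | some m => exact ⟨m, rfl⟩
    obtain ⟨m, hm⟩ := hsome
    have hspec := (List.min?_eq_some_iff).1 hm
    have hfil : (p ++ [x]).filter (fun y => PySem.Int.mod y space == r)
        = p.filter (fun y => PySem.Int.mod y space == r) ++ [x] := by
      simp [List.filter_append, hr]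
    have : ((p ++ [x]).filter (fun y => PySem.Int.mod y space == r)).min? = some (min m x) := by
      rw [hfil]
      refine (List.min?_eq_some_iff).2 ⟨?_, ?_⟩
      · rcases le_total m x with hmx | hmx
        · simp [min_eq_left hmx, hspec.1]
        · simp [min_eq_right hmx]
      · intro b hb
        rcases List.mem_append.1 hb with hb | hb
        · exact le_trans (min_le_left _ _) (hspec.2 b hb)
        · simp at hb; subst hb; exact min_le_right _ _
    unfold pvCMin
    rw [this, hm]
    simp

theorem pvCMin_append_other (space x : Int) (p : List Int) (r : Int)
    (h : PySem.Int.mod x space ≠ r) :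
    pvCMin space (p ++ [x]) r = pvCMin space p r := by
  simp [pvCMin, List.filter_append, h]

theorem pvCnt_append_other (space x : Int) (p : List Int) (r : Int)
    (h : PySem.Int.mod x space ≠ r) :
    pvCnt space (p ++ [x]) r = pvCnt space p r := by
  simp [pvCnt_append, h]

theorem pvFirst_append_other (space x : Int) (p : List Int) (r : Int)
    (h : PySem.Int.mod x space ≠ r) :
    pvFirst space (p ++ [x]) r = pvFirst space p r := by
  simp [pvFirst_append, h]

-- ---------- A side: the streaming argmax invariant ----------

-- state of A's loop over processed prefix p: exact counts, exact first occurrences, and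
-- (best_count, best_mod) = a maximal-count class whose first occurrence is smallest
def pvInvA (space : Int) (p : List Int)
    (st : PySem.Dict Int Int × PySem.Dict Int Int × Int × Int) : Prop :=
  (∀ r, st.1.getD r 0 = (pvCnt space p r : Int)) ∧
  (∀ r, st.2.1.get? r = pvFirst space p r) ∧
  (p = [] → st.2.2.1 = 0) ∧
  (p ≠ [] → ∃ m, st.2.1.get? st.2.2.2 = some m ∧
    st.2.2.1 = (pvCnt space p st.2.2.2 : Int) ∧
    (∀ r, pvCnt space p r ≤ pvCnt space p st.2.2.2) ∧
    (∀ r m', pvFirst space p r = some m' → pvCnt space p r = pvCnt space p st.2.2.2 → m ≤ m'))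

theorem pvInvA_empty (space : Int) :
    pvInvA space [] (PySem.Dict.empty, PySem.Dict.empty, 0, -1) := by
  refine ⟨?_, ?_, fun _ => rfl, fun hc => absurd rfl hc⟩
  · intro r; simp [PySem.Dict.getD_empty, pvCnt]
  · intro r; simp [PySem.Dict.get?_empty, pvFirst]

theorem pvInvA_step (space x : Int) (p : List Int)
    (st : PySem.Dict Int Int × PySem.Dict Int Int × Int × Int)
    (h : pvInvA space p st) :
    pvInvA space (p ++ [x]) (destroyTargets1Loop space st x) := by
  obtain ⟨mc, mf, bc, bm⟩ := st
  obtain ⟨h1, h2, h3, h4⟩ := h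
  dsimp only at h1 h2 h3 h4
  unfold destroyTargets1Loop
  dsimp only
  set r := PySem.Int.mod x space with hr
  have hcnt_r : pvCnt space (p ++ [x]) r = pvCnt space p r + 1 := by
    rw [pvCnt_append, if_pos hr.symm]
  have hother_cnt : ∀ r', r' ≠ r → pvCnt space (p ++ [x]) r' = pvCnt space p r' :=
    fun r' hcr => pvCnt_append_other space x p r' (fun hh => hcr (by rw [← hh, hr]))
  have hother_fst : ∀ r', r' ≠ r → pvFirst space (p ++ [x]) r' = pvFirst space p r' :=
    fun r' hcr => pvFirst_append_other space x p r' (fun hh => hcr (by rw [← hh, hr]))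
  set mc' := mc.modify r 0 (· + 1) with hmcdef
  set mf' := if mf.contains r then mf else mf.insert r x with hmfdef
  have hmc' : ∀ r', mc'.getD r' 0 = (pvCnt space (p ++ [x]) r' : Int) := by
    intro r'
    rw [hmcdef, PySem.Dict.getD_modify]
    by_cases hc : r' = r
    · rw [if_pos hc, h1 r, hc, hcnt_r]; push_cast; ring
    · rw [if_neg hc, h1 r', hother_cnt r' hc]
  obtain ⟨m1, hm1⟩ : ∃ m1, pvFirst space (p ++ [x]) r = some m1 := by
    apply pvFirst_isSome_of_cnt_ne_zero
    omega
  have hmf' : ∀ r', mf'.get? r' = pvFirst space (p ++ [x]) r' := by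
    intro r'
    rw [hmfdef]
    by_cases hcont : mf.contains r = true
    · rw [if_pos hcont]
      obtain ⟨m0, hm0⟩ : ∃ m0, mf.get? r = some m0 := by
        rw [PySem.Dict.contains_eq_isSome_get?] at hcont
        exact Option.isSome_iff_exists.1 hcont
      by_cases hc : r' = r
      · rw [hc, hm0, pvFirst_append, if_pos hr.symm, ← h2 r, hm0]
        rfl
      · rw [hother_fst r' hc, h2 r']
    · rw [if_neg hcont]
      have hnone : mf.get? r = none := by
        rw [PySem.Dict.contains_eq_isSome_get?] at hcont
        simpa using hcont
      by_cases hc : r' = r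
      · rw [hc, PySem.Dict.get?_insert_self, pvFirst_append, if_pos hr.symm, ← h2 r, hnone]
        rfl
      · rw [PySem.Dict.get?_insert_of_ne mf x hc, hother_fst r' hc, h2 r']
  have hget_r : mf'.get? r = some m1 := by rw [hmf' r, hm1]
  have hgd_r : mf'.getD r 0 = m1 := by rw [PySem.Dict.getD_eq_get?_getD, hget_r]; rfl
  split_ifs with hgt heq hcmp
  -- branch 1: count now strictly larger: best := (new count, r)
  · rw [hmc' r] at hgt
    refine ⟨hmc', hmf', by simp, fun _ => ?_⟩
    dsimp only
    refine ⟨m1, hget_r, hmc' r, ?_, ?_⟩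
    · intro r'
      by_cases hc : r' = r
      · rw [hc]
      · rw [hother_cnt r' hc]
        rcases eq_or_ne p [] with hp | hp
        · have h0 : pvCnt space p r' = 0 := by subst hp; simp [pvCnt]
          omega
        · obtain ⟨m0, hm0, hbc, hmax, htie⟩ := h4 hp
          have := hmax r'
          omega
    · intro r' m' hf' hcq
      by_cases hc : r' = r
      · rw [hc, hm1] at hf'
        exact le_of_eq (Option.some_injective _ hf')
      · exfalso
        rw [hother_cnt r' hc] at hcq
        rcases eq_or_ne p [] with hp | hp
        · have h0 : pvCnt space p r' = 0 := by subst hp; simp [pvCnt]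
          omega
        · obtain ⟨m0, hm0, hbc, hmax, htie⟩ := h4 hp
          have := hmax r'
          omega
  -- remaining branches: the count ties or stays behind; p cannot be empty
  all_goals rw [hmc' r] at hgt heq
  -- branch 2a: tie on counts and the new class has the smaller first element: best_mod := r
  · have hne : p ≠ [] := by
      intro hp
      have h30 := h3 hp
      have h0 : pvCnt space p r = 0 := by subst hp; simp [pvCnt]
      omega
    obtain ⟨m0, hm0, hbc, hmax, htie⟩ := h4 hne
    have hbmr : bm ≠ r := by
      intro hh
      rw [hh] at hbc
      omega
    have hget_bm : mf'.get? bm = some m0 := by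
      rw [hmf' bm, hother_fst bm hbmr, ← h2 bm, hm0]
    have hgd_bm : mf'.getD bm 0 = m0 := by rw [PySem.Dict.getD_eq_get?_getD, hget_bm]; rfl
    rw [hgd_bm, hgd_r] at hcmp
    refine ⟨hmc', hmf', by simp, fun _ => ?_⟩
    dsimp only
    refine ⟨m1, hget_r, by omega, ?_, ?_⟩
    · intro r'
      by_cases hc : r' = r
      · rw [hc]
      · rw [hother_cnt r' hc]
        have := hmax r'
        omega
    · intro r' m' hf' hcq
      by_cases hc : r' = r
      · rw [hc, hm1] at hf'
        exact le_of_eq (Option.some_injective _ hf')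
      · rw [hother_fst r' hc] at hf'
        rw [hother_cnt r' hc] at hcq
        have := htie r' m' hf' (by omega)
        omega
  -- branch 2b: tie on counts, the old best keeps the smaller first element: state unchanged
  · have hne : p ≠ [] := by
      intro hp
      have h30 := h3 hp
      have h0 : pvCnt space p r = 0 := by subst hp; simp [pvCnt]
      omega
    obtain ⟨m0, hm0, hbc, hmax, htie⟩ := h4 hne
    have hbmr : bm ≠ r := by
      intro hh
      rw [hh] at hbc
      omega
    have hget_bm : mf'.get? bm = some m0 := by
      rw [hmf' bm, hother_fst bm hbmr, ← h2 bm, hm0]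
    have hgd_bm : mf'.getD bm 0 = m0 := by rw [PySem.Dict.getD_eq_get?_getD, hget_bm]; rfl
    rw [hgd_bm, hgd_r] at hcmp
    refine ⟨hmc', hmf', by simp, fun _ => ?_⟩
    dsimp only
    refine ⟨m0, hget_bm, by rw [hother_cnt bm hbmr]; omega, ?_, ?_⟩
    · intro r'
      by_cases hc : r' = r
      · rw [hc, hother_cnt bm hbmr]
        omega
      · rw [hother_cnt r' hc, hother_cnt bm hbmr]
        have := hmax r'
        omega
    · intro r' m' hf' hcq
      by_cases hc : r' = r
      · rw [hc, hm1] at hf'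
        have : m1 = m' := Option.some_injective _ hf'
        omega
      · rw [hother_fst r' hc] at hf'
        rw [hother_cnt r' hc, hother_cnt bm hbmr] at hcq
        exact htie r' m' hf' hcq
  -- branch 3: count still behind: state unchanged
  · have hlt : (pvCnt space (p ++ [x]) r : Int) < bc := by omega
    have hne : p ≠ [] := by
      intro hp
      have h30 := h3 hp
      have h0 : pvCnt space p r = 0 := by subst hp; simp [pvCnt]
      omega
    obtain ⟨m0, hm0, hbc, hmax, htie⟩ := h4 hne
    have hbmr : bm ≠ r := by
      intro hh
      rw [hh] at hbc
      omega
    have hget_bm : mf'.get? bm = some m0 := by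
      rw [hmf' bm, hother_fst bm hbmr, ← h2 bm, hm0]
    refine ⟨hmc', hmf', by simp, fun _ => ?_⟩
    dsimp only
    refine ⟨m0, hget_bm, by rw [hother_cnt bm hbmr]; omega, ?_, ?_⟩
    · intro r'
      by_cases hc : r' = r
      · rw [hc, hother_cnt bm hbmr]
        omega
      · rw [hother_cnt r' hc, hother_cnt bm hbmr]
        have := hmax r'
        omega
    · intro r' m' hf' hcq
      by_cases hc : r' = r
      · exfalso
        rw [hc, hother_cnt bm hbmr] at hcq
        omega
      · rw [hother_fst r' hc] at hf'
        rw [hother_cnt r' hc, hother_cnt bm hbmr] at hcq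
        exact htie r' m' hf' hcq

theorem pvInvA_loop (space : Int) (l : List Int) :
    ∀ (p : List Int) (st : PySem.Dict Int Int × PySem.Dict Int Int × Int × Int),
      pvInvA space p st →
      pvInvA space (p ++ l) (l.foldl (destroyTargets1Loop space) st) := by
  induction l with
  | nil => intro p st h; simpa using h
  | cons x l ih =>
    intro p st h
    have := ih (p ++ [x]) _ (pvInvA_step space x p st h)
    simpa [List.append_assoc] using this

-- on a sorted list the first element of a class is its minimum
theorem pvFirst_sorted_le (space : Int) (s : List Int) (hs : s.Pairwise (· ≤ ·)) (r m : Int)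
    (hm : pvFirst space s r = some m) :
    ∀ y ∈ s, PySem.Int.mod y space = r → m ≤ y := by
  intro y hy hyr
  have hfil : (s.filter (fun z => PySem.Int.mod z space == r)).Pairwise (· ≤ ·) :=
    List.Pairwise.sublist List.filter_sublist hs
  have hyf : y ∈ s.filter (fun z => PySem.Int.mod z space == r) :=
    List.mem_filter.2 ⟨hy, by simp [hyr]⟩
  unfold pvFirst at hm
  cases hfl : s.filter (fun z => PySem.Int.mod z space == r) with
  | nil => rw [hfl] at hm; simp at hm
  | cons a t =>
    rw [hfl] at hm hyf hfil
    have ham : a = m := by simpa using hm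
    subst ham
    rcases List.mem_cons.1 hyf with hh | hh
    · exact le_of_eq hh.symm
    · exact (List.pairwise_cons.1 hfil).1 y hh

theorem pvBest_perm (space : Int) (xs ys : List Int) (hp : xs.Perm ys) (v : Int)
    (h : pvBest space xs v) : pvBest space ys v := by
  have hcnt : ∀ r, pvCnt space xs r = pvCnt space ys r :=
    fun r => hp.countP_congr (fun _ _ => rfl)
  obtain ⟨⟨hvmem, hvmin⟩, hmax, htie⟩ := h
  refine ⟨⟨hp.mem_iff.1 hvmem, fun y hy hm => hvmin y (hp.mem_iff.2 hy) hm⟩,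
    fun y hy => ?_, fun y hyc hc => ?_⟩
  · rw [← hcnt, ← hcnt]
    exact hmax y (hp.mem_iff.2 hy)
  · refine htie y ⟨hp.mem_iff.2 hyc.1, fun z hz hmz => hyc.2 z (hp.mem_iff.1 hz) hmz⟩ ?_
    rw [hcnt, hcnt]
    exact hc

theorem pvA_best (nums : List Int) (space : Int) (h : nums ≠ []) :
    pvBest space nums (destroyTargets1 nums space) := by
  set s := PySem.List.sorted nums (fun x => x) false with hs
  have hsne : s ≠ [] := by
    rw [hs]
    intro hc
    exact h ((PySem.List.sorted_eq_nil_iff nums (fun x => x) false).1 hc)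
  have hperm : s.Perm nums := PySem.List.sorted_perm nums (fun x => x) false
  have hpair : s.Pairwise (· ≤ ·) := by
    simpa using PySem.List.sorted_pairwise nums (fun x => x)
  set st := s.foldl (destroyTargets1Loop space) (PySem.Dict.empty, PySem.Dict.empty, 0, -1)
    with hst
  have hinv : pvInvA space s st := by
    have := pvInvA_loop space s [] _ (pvInvA_empty space)
    simpa [hst] using this
  obtain ⟨h1, h2, h3, h4⟩ := hinv
  obtain ⟨m, hm, hbc, hmax, htie⟩ := h4 hsne
  have hfst : pvFirst space s st.2.2.2 = some m := (h2 st.2.2.2).symm.trans hm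
  have hval : destroyTargets1 nums space = m := by
    show st.2.1.getD st.2.2.2 0 = m
    rw [PySem.Dict.getD_eq_get?_getD, hm]
    rfl
  rw [hval]
  apply pvBest_perm space s nums hperm
  obtain ⟨hmmem, hmmod⟩ := pvFirst_mem_class space s st.2.2.2 m hfst
  refine ⟨⟨hmmem, ?_⟩, ?_, ?_⟩
  · intro y hy hym
    rw [hmmod] at hym
    exact pvFirst_sorted_le space s hpair _ m hfst y hy hym
  · intro y hy
    rw [hmmod]
    exact hmax _
  · rintro y ⟨hy, hymin⟩ hc
    obtain ⟨m', hm'⟩ := pvFirst_isSome_of_cnt_ne_zero space s (PySem.Int.mod y space)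
      (by have := pvCnt_pos_of_mem space s y hy; omega)
    obtain ⟨hm'mem, hm'mod⟩ := pvFirst_mem_class space s _ m' hm'
    have hle : m' ≤ y := pvFirst_sorted_le space s hpair _ m' hm' y hy rfl
    have hge : y ≤ m' := hymin m' hm'mem hm'mod
    have hym : m' = y := le_antisymm hle hge
    subst hym
    refine htie _ m' hm' ?_
    rw [hmmod] at hc
    exact hc

-- the dictionary built by B's first loop: one entry (r, (count, min)) per remainder class,
-- in first-occurrence order
def pvInvB (space : Int) (p : List Int) (d : PySem.Dict Int (Int × Int)) : Prop :=
  d.items = (PySem.Set.ofList (p.map (fun x => PySem.Int.mod x space))).map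
    (fun r => (r, ((pvCnt space p r : Int), pvCMin space p r)))

theorem pvIfMin (m x : Int) : (if m < x then m else x) = min m x := by
  split_ifs with hmx
  · exact (min_eq_left hmx.le).symm
  · exact (min_eq_right (not_lt.1 hmx)).symm

theorem pvInvB_keys (space : Int) (p : List Int) (d : PySem.Dict Int (Int × Int))
    (h : pvInvB space p d) :
    d.keys = PySem.Set.ofList (p.map (fun x => PySem.Int.mod x space)) := by
  unfold pvInvB at h
  simp [PySem.Dict.keys, h, List.map_map, Function.comp_def]

theorem pvInvB_step (space x : Int) (p : List Int) (d : PySem.Dict Int (Int × Int))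
    (h : pvInvB space p d) :
    pvInvB space (p ++ [x])
      (match d.get? (PySem.Int.mod x space) with
       | some (c, m) => d.insert (PySem.Int.mod x space)
           (c + 1, if m < x then m else x)
       | none => d.insert (PySem.Int.mod x space) (1, x)) := by
  set r := PySem.Int.mod x space with hr
  set S := PySem.Set.ofList (p.map (fun x => PySem.Int.mod x space)) with hS
  have hkeys : d.keys = S := pvInvB_keys space p d h
  have hnd : d.keys.Nodup := by rw [hkeys]; exact PySem.Set.nodup_ofList _
  have hS' : PySem.Set.ofList ((p ++ [x]).map (fun x => PySem.Int.mod x space))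
      = PySem.Set.add S r := by
    rw [List.map_append]
    simpa using PySem.Set.ofList_append_singleton (p.map (fun x => PySem.Int.mod x space)) r
  by_cases hmem : r ∈ S
  · -- class already seen: overwrite in place
    have hcnt0 : pvCnt space p r ≠ 0 := by
      rw [hS, PySem.Set.mem_ofList] at hmem
      obtain ⟨y, hy, hyr⟩ := List.mem_map.1 hmem
      have := pvCnt_pos_of_mem space p y hy
      rw [hyr] at this; omega
    have hitem : (r, ((pvCnt space p r : Int), pvCMin space p r)) ∈ d.items := by
      rw [h]; exact List.mem_map.2 ⟨r, hmem, rfl⟩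
    have hget : d.get? r = some ((pvCnt space p r : Int), pvCMin space p r) :=
      PySem.Dict.get?_of_mem_items d hitem hnd
    rw [hget]
    have hcont : d.contains r = true := (PySem.Dict.contains_iff_mem_keys d r).2 (hkeys ▸ hmem)
    unfold pvInvB
    rw [PySem.Dict.items_insert_of_contains d _ hcont, h, hS', PySem.Set.add_of_mem hmem,
      List.map_map]
    refine List.map_congr_left ?_
    intro r' hr'
    by_cases hrr : r' = r
    · subst hrr
      simp only [Function.comp_apply]
      rw [if_pos (by simp)]
      have hpm : PySem.Int.mod x space = r := hr.symm
      have hc : pvCnt space (p ++ [x]) r = pvCnt space p r + 1 := by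
        rw [pvCnt_append, if_pos hpm]
      have hm : pvCMin space (p ++ [x]) r = min (pvCMin space p r) x := by
        have hmm := pvCMin_append_same space x p (by rw [hpm]; exact hcnt0)
        rwa [hpm] at hmm
      rw [hc, hm, pvIfMin]
      push_cast
      rfl
    · have hne : PySem.Int.mod x space ≠ r' := fun hcon => hrr (by rw [← hcon, hr])
      simp only [Function.comp_apply]
      rw [if_neg (by simpa using hrr), pvCnt_append_other space x p r' hne,
        pvCMin_append_other space x p r' hne]
  · -- new class: append
    have hget : d.get? r = none := by
      rw [PySem.Dict.get?_eq_none_iff_not_mem_keys, hkeys]; exact hmem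
    rw [hget]
    have hcont : d.contains r = false := by
      rw [← Bool.not_eq_true, PySem.Dict.contains_iff_mem_keys d r, hkeys]; exact hmem
    have hcnt0 : pvCnt space p r = 0 := by
      rw [pvCnt_eq_zero_iff]
      intro y hy hyr
      exact hmem (by rw [hS, PySem.Set.mem_ofList]; exact List.mem_map.2 ⟨y, hy, hyr⟩)
    unfold pvInvB
    rw [PySem.Dict.items_insert_of_not_contains d _ hcont, h, hS',
      PySem.Set.add_of_not_mem hmem, List.map_append]
    congr 1
    · refine List.map_congr_left ?_
      intro r' hr'
      have hrr : r' ≠ r := fun hcon => hmem (hcon ▸ hr')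
      have hne : PySem.Int.mod x space ≠ r' := fun hcon => hrr (by rw [← hcon, hr])
      rw [pvCnt_append_other space x p r' hne, pvCMin_append_other space x p r' hne]
    · have hc : pvCnt space (p ++ [x]) r = 1 := by
        simp [pvCnt_append, ← hr, hcnt0]
      have hfil : p.filter (fun y => PySem.Int.mod y space == r) = [] := by
        have := hcnt0
        rwa [pvCnt, List.countP_eq_length_filter, List.length_eq_zero_iff] at this
      have hm : pvCMin space (p ++ [x]) r = x := by
        unfold pvCMin
        rw [List.filter_append, hfil]
        simp [← hr]
      simp [hc, hm]

theorem pvInvB_loop (space : Int) (l : List Int) :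
    ∀ (p : List Int) (d : PySem.Dict Int (Int × Int)), pvInvB space p d →
    pvInvB space (p ++ l)
      (l.foldl (fun (d : PySem.Dict Int (Int × Int)) num =>
        let r := PySem.Int.mod num space
        match d.get? r with
        | some (c, m) => d.insert r (c + 1, if m < num then m else num)
        | none => d.insert r (1, num)) d) := by
  induction l with
  | nil => intro p d h; simpa using h
  | cons x l ih =>
    intro p d h
    have h' := pvInvB_step space x p d h
    have := ih (p ++ [x]) _ h'
    simpa [List.append_assoc] using this

theorem pvInvB_empty (space : Int) : pvInvB space [] PySem.Dict.empty := by
  simp [pvInvB, PySem.Set.ofList_nil]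
  rfl

-- ---------- B side: the selection scan ----------

-- "b is at least as good as a" for B's (count, min) pairs
def pvR (a b : Int × Int) : Prop := a.1 ≤ b.1 ∧ (a.1 = b.1 → b.2 ≤ a.2)

theorem pvR_refl (a : Int × Int) : pvR a a := ⟨le_refl _, fun _ => le_refl _⟩

theorem pvR_trans (a b c : Int × Int) (h1 : pvR a b) (h2 : pvR b c) : pvR a c := by
  obtain ⟨h11, h12⟩ := h1; obtain ⟨h21, h22⟩ := h2
  refine ⟨le_trans h11 h21, fun he => ?_⟩
  have hb : a.1 = b.1 := by omega
  have hc : b.1 = c.1 := by omega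
  exact le_trans (h22 hc) (h12 hb)

theorem pvSel (l : List (Int × Int)) :
    ∀ b0 : Int × Int,
      (l.foldl (fun (b : Int × Int) cm =>
        if cm.1 > b.1 || (cm.1 == b.1 && cm.2 < b.2) then cm else b) b0 ∈ b0 :: l) ∧
      ∀ y ∈ b0 :: l, pvR y (l.foldl (fun (b : Int × Int) cm =>
        if cm.1 > b.1 || (cm.1 == b.1 && cm.2 < b.2) then cm else b) b0) := by
  induction l with
  | nil =>
    intro b0
    constructor
    · simp
    · intro y hy; simp at hy; subst hy; exact pvR_refl _
  | cons x l ih =>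
    intro b0
    set b1 := if x.1 > b0.1 || (x.1 == b0.1 && x.2 < b0.2) then x else b0 with hb1
    have hcases : b1 = x ∨ b1 = b0 := by
      rw [hb1]; split_ifs <;> simp
    have hRb0 : pvR b0 b1 := by
      rw [hb1]; split_ifs with hc
    -- hc : condition true
      · simp only [Bool.or_eq_true, decide_eq_true_eq, Bool.and_eq_true, beq_iff_eq] at hc
        exact ⟨by omega, by omega⟩
      · exact pvR_refl _
    have hRx : pvR x b1 := by
      rw [hb1]; split_ifs with hc
      · exact pvR_refl _
      · simp only [Bool.or_eq_true, decide_eq_true_eq, Bool.and_eq_true, beq_iff_eq,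
          not_or, not_and, not_lt] at hc
        refine ⟨by omega, fun he => ?_⟩
        exact hc.2 (by omega)
    obtain ⟨ihmem, ihbest⟩ := ih b1
    constructor
    · simp only [List.foldl_cons, ← hb1]
      rcases List.mem_cons.1 ihmem with hm | hm
      · rw [hm]; rcases hcases with hh | hh <;> rw [hh] <;> simp
      · exact List.mem_cons_of_mem _ (List.mem_cons_of_mem _ hm)
    · intro y hy
      simp only [List.foldl_cons, ← hb1]
      rcases List.mem_cons.1 hy with hy | hy
      · subst hy; exact pvR_trans _ _ _ hRb0 (ihbest b1 (List.mem_cons_self))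
      · rcases List.mem_cons.1 hy with hy | hy
        · subst hy; exact pvR_trans _ _ _ hRx (ihbest b1 (List.mem_cons_self))
        · exact ihbest y (List.mem_cons_of_mem _ hy)

theorem pvB_best (nums : List Int) (space : Int) (h : nums ≠ []) :
    pvBest space nums (destroyTargets1_alt nums space) := by
  set S := PySem.Set.ofList (nums.map (fun x => PySem.Int.mod x space)) with hS
  set stats := nums.foldl (fun (d : PySem.Dict Int (Int × Int)) num =>
      let r := PySem.Int.mod num space
      match d.get? r with
      | some (c, m) => d.insert r (c + 1, if m < num then m else num)
      | none => d.insert r (1, num)) PySem.Dict.empty with hstats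
  have hinv : pvInvB space nums stats := by
    have := pvInvB_loop space nums [] PySem.Dict.empty (pvInvB_empty space)
    simpa [hstats] using this
  have hvals : stats.values
      = S.map (fun r => ((pvCnt space nums r : Int), pvCMin space nums r)) := by
    unfold pvInvB at hinv
    simp [PySem.Dict.values, hinv, List.map_map, Function.comp_def]
    rw [hS]
  set res := stats.values.foldl (fun (b : Int × Int) cm =>
      if cm.1 > b.1 || (cm.1 == b.1 && cm.2 < b.2) then cm else b) (0, 0) with hres
  have halt : destroyTargets1_alt nums space = res.2 := rfl
  obtain ⟨hmem, hbest⟩ := pvSel stats.values (0, 0)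
  rw [← hres] at hmem hbest
  have hScnt : ∀ r ∈ S, pvCnt space nums r ≠ 0 := by
    intro r hrS
    rw [hS, PySem.Set.mem_ofList] at hrS
    obtain ⟨y, hy, hyr⟩ := List.mem_map.1 hrS
    have := pvCnt_pos_of_mem space nums y hy
    rw [hyr] at this; omega
  have hclassmem : ∀ y ∈ nums,
      ((pvCnt space nums (PySem.Int.mod y space) : Int),
        pvCMin space nums (PySem.Int.mod y space)) ∈ stats.values := by
    intro y hy
    rw [hvals]
    exact List.mem_map.2 ⟨PySem.Int.mod y space,
      by rw [hS, PySem.Set.mem_ofList]; exact List.mem_map.2 ⟨y, hy, rfl⟩, rfl⟩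
  have hresmem : res ∈ stats.values := by
    rcases List.mem_cons.1 hmem with h0 | h0
    · exfalso
      obtain ⟨y, hy⟩ := List.exists_mem_of_ne_nil nums h
      have hRy := hbest _ (List.mem_cons_of_mem _ (hclassmem y hy))
      rw [h0] at hRy
      obtain ⟨h1, -⟩ := hRy
      have := pvCnt_pos_of_mem space nums y hy
      simp only at h1
      omega
    · exact h0
  obtain ⟨rstar, hrstarS, hrstar⟩ := List.mem_map.1 (hvals ▸ hresmem)
  have hcnt0 : pvCnt space nums rstar ≠ 0 := hScnt rstar hrstarS
  obtain ⟨hm_mem, hm_mod, hm_min⟩ := pvCMin_spec space nums rstar hcnt0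
  rw [halt, ← hrstar]
  simp only
  refine ⟨⟨hm_mem, ?_⟩, ?_, ?_⟩
  · intro y hy hymod
    rw [hm_mod] at hymod
    exact hm_min y hy hymod
  · intro y hy
    have hRy := hbest _ (List.mem_cons_of_mem _ (hclassmem y hy))
    rw [← hrstar] at hRy
    obtain ⟨h1, -⟩ := hRy
    simp only at h1
    rw [hm_mod]
    omega
  · intro y hyclass hycnt
    obtain ⟨hy, -⟩ := hyclass
    have hRy := hbest _ (List.mem_cons_of_mem _ (hclassmem y hy))
    rw [← hrstar] at hRy
    obtain ⟨-, h2⟩ := hRy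
    rw [hm_mod] at hycnt
    have h2' := h2 (by simp only; omega)
    simp only at h2'
    have hylem : pvCMin space nums (PySem.Int.mod y space) ≤ y := by
      obtain ⟨-, -, hmin⟩ := pvCMin_spec space nums (PySem.Int.mod y space)
        (by have := pvCnt_pos_of_mem space nums y hy; omega)
      exact hmin y hy rfl
    exact le_trans h2' hylem

-- ===== VERDICT (by name: the statement is the Claim_ definition above) =====
theorem destroyTargets1_spec : Claim_equal_destroyTargets1 := by
  intro nums space _ hpre
  unfold Spec_destroyTargets1
  exact pvBest_unique space nums _ _ (pvA_best nums space hpre.1) (pvB_best nums space hpre.1)
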